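-- pv_equiv track=rewrite | github.com/saraitne11/CodingTest | SamsungSWExpert/SamsungProblem2112/Problem2112_combination.py | column_check
-- ===== SOURCE A (Python) =====
-- def column_check(column, k):
--     cnt = 1
--     for j in range(1, len(column)):
--         if column[j] == column[j-1]:
--             cnt += 1
--         else:
--             cnt = 1
--         if cnt >= k:
--             return True
--     return False
-- ===== SOURCE B (Python) =====
-- def column_check(column, k):
--     # Run-length encode the column once, then ask whether any run reaches k.
--     groups = []  # (value, run length) pairs, in order
--     for x in column:
--         if groups and groups[-1][0] == x:
--             groups[-1] = (x, groups[-1][1] + 1)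
--         else:
--             groups.append((x, 1))
--     return any(c >= k for _, c in groups)
-- ===== Notes on version B (the rewrite author's own statement) =====
-- stated objective: alternative
-- what changed: Replaces A's index-based running-counter state machine with early return by a run-length encoding pass (groupby by hand) followed by an any-run-reaches-k test.
-- intended difference: On single-element columns with k <= 1, A returns False because its comparison loop never executes, while B returns True: the lone element is itself a run of length 1 >= k, which is the intended answer. — e.g. on column_check([7], 1): A returns false, B returns true
import Mathlib
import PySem

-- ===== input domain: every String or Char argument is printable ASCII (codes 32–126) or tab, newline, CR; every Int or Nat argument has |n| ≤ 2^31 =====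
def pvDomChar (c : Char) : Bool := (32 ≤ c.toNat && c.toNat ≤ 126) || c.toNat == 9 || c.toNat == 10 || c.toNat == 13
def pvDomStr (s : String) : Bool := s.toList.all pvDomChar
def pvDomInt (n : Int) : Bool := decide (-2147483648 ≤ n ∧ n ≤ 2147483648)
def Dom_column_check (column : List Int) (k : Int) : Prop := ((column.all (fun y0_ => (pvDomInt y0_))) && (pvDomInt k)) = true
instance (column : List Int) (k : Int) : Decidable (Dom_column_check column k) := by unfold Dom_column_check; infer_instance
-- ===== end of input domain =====

-- B replaces A's running-counter state machine by a run-length-encode-then-any pass (alternative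
-- algorithm, same cost); B intentionally returns True on a single-element column with k ≤ 1 (see D_).

-- ===== PORT A =====
-- the early-return for-loop over range(1, len(column)) with the running counter cnt
def columnCheckLoop (column : List Int) (k : Int) : List Int → Int → Bool
  | [], _ => false
  | j :: js, cnt =>
    -- indices j and j-1 are always in range, so pyGetD's default is never used
    let cnt' := if PySem.List.pyGetD column j 0 = PySem.List.pyGetD column (j - 1) 0
                then cnt + 1 else 1
    if k ≤ cnt' then true else columnCheckLoop column k js cnt'

def column_check (column : List Int) (k : Int) : Bool :=
  columnCheckLoop column k (PySem.List.pyRange 1 (column.length : Int) 1) 1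

-- ===== PORT B =====
-- the loop body: extend the last (value, count) group or open a new one
def bStep (groups : List (Int × Int)) (x : Int) : List (Int × Int) :=
  match groups.getLast? with
  | some (v, c) => if v = x then groups.dropLast ++ [(x, c + 1)] else groups ++ [(x, 1)]
  | none => groups ++ [(x, 1)]

-- one pass building the run-length groups, then the any-run-reaches-k test
def column_check_alt (column : List Int) (k : Int) : Bool :=
  let groups := column.foldl bStep []
  groups.any (fun vc => decide (k ≤ vc.2))

-- ===== PRECONDITION & SPEC =====
-- On single-element columns with k ≤ 1, A returns False because its comparison loop never executes,
-- while B returns True: the lone element is itself a run of length 1 ≥ k, the intended answer.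
def D_column_check (column : List Int) (k : Int) : Prop := column.length = 1 ∧ k ≤ 1
instance (column : List Int) (k : Int) : Decidable (D_column_check column k) := by
  unfold D_column_check; infer_instance

def Spec_column_check (column : List Int) (k : Int) (out : Bool) : Prop :=
  ¬ D_column_check column k → out = column_check_alt column k
instance (column : List Int) (k : Int) (out : Bool) : Decidable (Spec_column_check column k out) := by
  unfold Spec_column_check; infer_instance

def pvDiffWitness_column_check : List Int × Int := ([7], 1)
def pvDiffWitnessOut_column_check : Bool × Bool := (false, true)

-- ===== CLAIM (what is proved, stated in full; the proofs are below) =====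
def Claim_unchanged_column_check : Prop := ∀ (column : List Int) (k : Int), Dom_column_check column k → Spec_column_check column k (column_check column k)
def Claim_changed_column_check : Prop := Dom_column_check (pvDiffWitness_column_check.1) (pvDiffWitness_column_check.2) ∧ D_column_check (pvDiffWitness_column_check.1) (pvDiffWitness_column_check.2) ∧ column_check (pvDiffWitness_column_check.1) (pvDiffWitness_column_check.2) = pvDiffWitnessOut_column_check.1 ∧ column_check_alt (pvDiffWitness_column_check.1) (pvDiffWitness_column_check.2) = pvDiffWitnessOut_column_check.2 ∧ pvDiffWitnessOut_column_check.1 ≠ pvDiffWitnessOut_column_check.2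
def Claim_exact_column_check : Prop := ∀ (column : List Int) (k : Int), Dom_column_check column k → D_column_check column k → column_check column k ≠ column_check_alt column k

-- ===== LEMMAS AND PROOFS =====

-- run lengths of x :: t, with the current run already counted to c
def goRuns : Int → Int → List Int → List Int
  | _, c, [] => [c]
  | x, c, b :: r => if b = x then goRuns b (c + 1) r else c :: goRuns b 1 r

-- max of a list of positive run lengths (0 for [])
def lmax : List Int → Int
  | [] => 0
  | x :: t => max x (lmax t)

-- A's loop rephrased on the values themselves (x = previous element, t = rest)
def gLoop (k : Int) : Int → List Int → Int → Bool
  | _, [], _ => false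
  | x, b :: r, cnt =>
    let c := if b = x then cnt + 1 else 1
    if k ≤ c then true else gLoop k b r c


-- goRuns never produces the empty list
lemma goRuns_ne_nil : ∀ (t : List Int) (x c : Int), goRuns x c t ≠ [] := by
  intro t
  induction t with
  | nil => intro x c; simp [goRuns]
  | cons b r ih =>
    intro x c
    simp only [goRuns]
    split
    · exact ih b (c + 1)
    · simp

lemma le_lmax_goRuns : ∀ (t : List Int) (x c : Int), c ≤ lmax (goRuns x c t) := by
  intro t
  induction t with
  | nil => intro x c; simp [goRuns, lmax]
  | cons b r ih =>
    intro x c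
    simp only [goRuns]
    split
    · exact le_trans (by omega) (ih b (c + 1))
    · simp [lmax]

lemma goRuns_pos : ∀ (t : List Int) (x c : Int), 1 ≤ c → ∀ v ∈ goRuns x c t, 1 ≤ v := by
  intro t
  induction t with
  | nil => intro x c hc v hv; simp [goRuns] at hv; omega
  | cons b r ih =>
    intro x c hc v hv
    simp only [goRuns] at hv
    split at hv
    · exact ih b (c + 1) (by omega) v hv
    · rcases List.mem_cons.mp hv with h | h
      · omega
      · exact ih b 1 le_rfl v h

lemma any_eq_lmax (k : Int) :
    ∀ (L : List Int), L ≠ [] → (∀ c ∈ L, 1 ≤ c) →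
      (L.any fun c => decide (k ≤ c)) = decide (k ≤ lmax L) := by
  intro L
  induction L with
  | nil => intro h; exact absurd rfl h
  | cons x t ih =>
    intro _ hpos
    cases t with
    | nil =>
      have hx : 1 ≤ x := hpos x (by simp)
      simp only [List.any_cons, List.any_nil, Bool.or_false, lmax]
      rw [decide_eq_decide]
      omega
    | cons y r =>
      have ht := ih (by simp) (fun c hc => hpos c (List.mem_cons_of_mem _ hc))
      simp only [List.any_cons] at ht ⊢
      rw [show lmax (x :: y :: r) = max x (lmax (y :: r)) from rfl, ht,
        ← Bool.decide_or, decide_eq_decide]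
      exact le_max_iff.symm

lemma gLoop_cons_eq (k : Int) :
    ∀ (r : List Int) (b x cnt : Int), 1 ≤ cnt →
      gLoop k x (b :: r) cnt
        = decide (k ≤ lmax (goRuns b (if b = x then cnt + 1 else 1) r)) := by
  intro r
  induction r with
  | nil =>
    intro b x cnt hcnt
    simp only [gLoop, goRuns, lmax]
    split
    · by_cases hk : k ≤ cnt + 1
      · simp only [if_pos hk]
        have : k ≤ max (cnt + 1) 0 := by omega
        simp [this]
      · simp only [if_neg hk]
        have : ¬ k ≤ max (cnt + 1) 0 := by omega
        simp [this]
    · by_cases hk : k ≤ (1 : Int) <;> simp [hk]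
  | cons y r2 ih =>
    intro b x cnt hcnt
    have hc : (1 : Int) ≤ if b = x then cnt + 1 else 1 := by split <;> omega
    rw [show gLoop k x (b :: y :: r2) cnt
        = (if k ≤ (if b = x then cnt + 1 else 1) then true
           else gLoop k b (y :: r2) (if b = x then cnt + 1 else 1)) from rfl]
    rw [ih y b _ hc]
    rw [show goRuns b (if b = x then cnt + 1 else 1) (y :: r2)
        = (if y = b then goRuns y ((if b = x then cnt + 1 else 1) + 1) r2
           else (if b = x then cnt + 1 else 1) :: goRuns y 1 r2) from rfl]
    generalize (if b = x then cnt + 1 else 1) = c at hc ⊢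
    by_cases hyb : y = b
    · rw [if_pos hyb, if_pos hyb]
      have h2 := le_lmax_goRuns r2 y (c + 1)
      by_cases hk : k ≤ c
      · simp only [if_pos hk]
        have : k ≤ lmax (goRuns y (c + 1) r2) := by omega
        simp [this]
      · rw [if_neg hk]
    · rw [if_neg hyb, if_neg hyb,
        show lmax (c :: goRuns y 1 r2) = max c (lmax (goRuns y 1 r2)) from rfl]
      have h2 := le_lmax_goRuns r2 y 1
      by_cases hk : k ≤ c
      · simp only [if_pos hk]
        have : k ≤ max c (lmax (goRuns y 1 r2)) := le_max_of_le_left hk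
        simp [this]
      · rw [if_neg hk, decide_eq_decide]
        omega

lemma bFold_split :
    ∀ (t : List Int) (gs : List (Int × Int)) (v c : Int),
      List.foldl bStep (gs ++ [(v, c)]) t = gs ++ List.foldl bStep [(v, c)] t := by
  intro t
  induction t with
  | nil => intro gs v c; simp
  | cons x t2 ih =>
    intro gs v c
    simp only [List.foldl_cons]
    rw [show bStep (gs ++ [(v, c)]) x
        = if v = x then gs ++ [(x, c + 1)] else (gs ++ [(v, c)]) ++ [(x, 1)] by
      simp [bStep]]
    rw [show bStep [(v, c)] x
        = if v = x then [(x, c + 1)] else [(v, c)] ++ [(x, 1)] by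
      simp [bStep]]
    split
    · rw [ih]
    · rw [ih, ih [(v, c)] x 1, List.append_assoc]

lemma map_snd_bFold :
    ∀ (t : List Int) (v c : Int),
      (List.foldl bStep [(v, c)] t).map Prod.snd = goRuns v c t := by
  intro t
  induction t with
  | nil => intro v c; simp [goRuns]
  | cons x t2 ih =>
    intro v c
    simp only [List.foldl_cons]
    rw [show bStep [(v, c)] x = if v = x then [(x, c + 1)] else [(v, c)] ++ [(x, 1)] by
      simp [bStep]]
    simp only [goRuns]
    by_cases h : x = v
    · simp only [h]
      exact ih v (c + 1)
    · rw [if_neg (fun hh => h hh.symm), if_neg h, bFold_split t2 [(v, c)] x 1]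
      simp [ih x 1]

lemma columnCheckLoop_eq_gLoop (k : Int) :
    ∀ (t pre : List Int) (x cnt : Int),
      columnCheckLoop (pre ++ x :: t) k
        (PySem.List.pyRange ((pre.length : Int) + 1) (((pre ++ x :: t).length : Int)) 1) cnt
      = gLoop k x t cnt := by
  intro t
  induction t with
  | nil =>
    intro pre x cnt
    rw [PySem.List.pyRange_one_eq_nil (by simp)]
    rfl
  | cons b r ih =>
    intro pre x cnt
    have hlt : ((pre.length : Int) + 1) < (((pre ++ x :: b :: r).length : Int)) := by
      simp [List.length_append]
    rw [PySem.List.pyRange_one_cons hlt]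
    simp only [columnCheckLoop]
    have hA : PySem.List.pyGetD (pre ++ x :: b :: r) ((pre.length : Int) + 1) 0 = b := by
      rw [show ((pre.length : Int) + 1) = ((pre.length + 1 : Nat) : Int) by push_cast; ring,
        PySem.List.pyGetD_natCast, List.getD_eq_getElem?_getD,
        List.getElem?_append_right (by omega)]
      simp
    have hB : PySem.List.pyGetD (pre ++ x :: b :: r) ((pre.length : Int) + 1 - 1) 0 = x := by
      rw [show ((pre.length : Int) + 1 - 1) = ((pre.length : Nat) : Int) by ring,
        PySem.List.pyGetD_natCast, List.getD_eq_getElem?_getD,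
        List.getElem?_append_right le_rfl]
      simp
    rw [hA, hB]
    rw [show gLoop k x (b :: r) cnt
        = (if k ≤ (if b = x then cnt + 1 else 1) then true
           else gLoop k b r (if b = x then cnt + 1 else 1)) from rfl]
    have hstep := ih (pre ++ [x]) b (if b = x then cnt + 1 else 1)
    rw [List.append_assoc, List.singleton_append] at hstep
    have hcast : ((pre ++ [x]).length : Int) + 1 = (pre.length : Int) + 1 + 1 := by
      simp [List.length_append]
    rw [hcast] at hstep
    rw [hstep]

-- ===== VERDICT (by name: the statement is the Claim_ definition above) =====
-- any over (value,count) pairs is any over the counts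
lemma any_snd (k : Int) (gs : List (Int × Int)) :
    (gs.any fun vc => decide (k ≤ vc.2)) = ((gs.map Prod.snd).any fun c => decide (k ≤ c)) := by
  rw [List.any_map]; rfl

-- the two-element head step: A misses only the length-1 first run, which cannot hold the max
lemma lmax_goRuns_head (x b : Int) (r : List Int) :
    lmax (goRuns x 1 (b :: r)) = lmax (goRuns b (if b = x then 1 + 1 else 1) r) := by
  rw [show goRuns x 1 (b :: r)
      = (if b = x then goRuns b (1 + 1) r else 1 :: goRuns b 1 r) from rfl]
  by_cases hbx : b = x
  · rw [if_pos hbx, if_pos hbx]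
  · rw [if_neg hbx, if_neg hbx,
      show lmax (1 :: goRuns b 1 r) = max 1 (lmax (goRuns b 1 r)) from rfl]
    have := le_lmax_goRuns r b 1
    omega

-- B's value on a column with at least two elements
lemma alt_eq_lmax (x b : Int) (r : List Int) (k : Int) :
    column_check_alt (x :: b :: r) k = decide (k ≤ lmax (goRuns x 1 (b :: r))) := by
  have h0 : column_check_alt (x :: b :: r) k
      = ((List.foldl bStep [(x, 1)] (b :: r)).any fun vc => decide (k ≤ vc.2)) := by rfl
  rw [h0, any_snd, map_snd_bFold]
  exact any_eq_lmax k _ (goRuns_ne_nil _ _ _) (goRuns_pos _ _ _ le_rfl)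

-- A's value on a column with at least two elements
lemma check_eq_lmax (x b : Int) (r : List Int) (k : Int) :
    column_check (x :: b :: r) k = decide (k ≤ lmax (goRuns x 1 (b :: r))) := by
  have hA := columnCheckLoop_eq_gLoop k (b :: r) [] x 1
  simp only [List.nil_append, List.length_nil, Nat.cast_zero, zero_add] at hA
  rw [show column_check (x :: b :: r) k
      = columnCheckLoop (x :: b :: r) k
          (PySem.List.pyRange 1 (((x :: b :: r).length : Int)) 1) 1 from rfl,
    hA, gLoop_cons_eq k r b x 1 le_rfl, lmax_goRuns_head]

theorem column_check_spec : Claim_unchanged_column_check := by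
  unfold Claim_unchanged_column_check
  intro column k _
  unfold Spec_column_check
  intro hD
  cases column with
  | nil => rfl
  | cons x t =>
    cases t with
    | nil =>
      have hk1 : ¬ k ≤ 1 := fun h => hD ⟨rfl, h⟩
      have hA : column_check [x] k = false := by
        rw [show column_check [x] k
            = columnCheckLoop [x] k (PySem.List.pyRange 1 1 1) 1 from rfl,
          PySem.List.pyRange_one_eq_nil le_rfl]
        rfl
      have hB : column_check_alt [x] k = (decide (k ≤ 1) || false) := by rfl
      rw [hA, hB]
      simp [hk1]
    | cons b r =>
      rw [check_eq_lmax, alt_eq_lmax]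

theorem column_check_changed : Claim_changed_column_check := by
  unfold Claim_changed_column_check; decide

theorem column_check_tight : Claim_exact_column_check := by
  unfold Claim_exact_column_check
  intro column k _ hD
  obtain ⟨hlen, hk⟩ := hD
  cases column with
  | nil => simp at hlen
  | cons x t =>
    cases t with
    | nil =>
      have hA : column_check [x] k = false := by
        rw [show column_check [x] k
            = columnCheckLoop [x] k (PySem.List.pyRange 1 1 1) 1 from rfl,
          PySem.List.pyRange_one_eq_nil le_rfl]
        rfl
      have hB : column_check_alt [x] k = (decide (k ≤ 1) || false) := by rfl
      rw [hA, hB]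
      simp [hk]
    | cons b r => simp at hlen
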